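-- pv_equiv track=rewrite | github.com/RobbyLankford/python | mit/6.1010/recitation/week-05/midpoint/question-03.py | all_phrases
-- ===== SOURCE A (Python) =====
-- def all_phrases(grammar, root):
--     """
--     Using rule lists in the grammar dict, expand root into all possible
--     phrases. Each phrase is a tuple of terminal word strings.
--     Return a set of all valid phrases.
--     """
--
--     #> Base case: root is not a terminal word
--     if root not in grammar:
--         return {tuple([root])}
--
--     #> Recursive case: iterate through each rule associated with the root
--     phrases = set()
--     for rules in grammar[root]:
--         sub_phrases = {()}
--         for rule in rules:
--             rec_phrases = all_phrases(grammar, rule)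
--             sub_phrases = {x + y for x in sub_phrases for y in rec_phrases}
--
--         phrases.update(sub_phrases)
--
--     return phrases
-- ===== SOURCE B (Python) =====
-- def all_phrases(grammar, root):
--     """
--     Using rule lists in the grammar dict, expand root into all possible
--     phrases. Each phrase is a tuple of terminal word strings.
--     Return a set of all valid phrases.
--     """
--     cache = {}
--
--     def solve(symbol):
--         #> Base case: symbol is not a nonterminal
--         if symbol not in grammar:
--             return {(symbol,)}
--         #> Memoized: each nonterminal is expanded at most once
--         if symbol in cache:
--             return cache[symbol]
--         result = set()
--         for rules in grammar[symbol]: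
--             sub_phrases = {()}
--             for rule in rules:
--                 rec_phrases = solve(rule)
--                 sub_phrases = {x + y for x in sub_phrases for y in rec_phrases}
--             result |= sub_phrases
--         cache[symbol] = result
--         return result
--
--     return solve(root)
-- ===== Notes on version B (the rewrite author's own statement) =====
-- stated objective: alternative
-- what changed: B memoizes the phrase set of each nonterminal in a cache dict threaded through the recursion, so every nonterminal is expanded at most once instead of being re-expanded at every occurrence as in A.
import Mathlib
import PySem

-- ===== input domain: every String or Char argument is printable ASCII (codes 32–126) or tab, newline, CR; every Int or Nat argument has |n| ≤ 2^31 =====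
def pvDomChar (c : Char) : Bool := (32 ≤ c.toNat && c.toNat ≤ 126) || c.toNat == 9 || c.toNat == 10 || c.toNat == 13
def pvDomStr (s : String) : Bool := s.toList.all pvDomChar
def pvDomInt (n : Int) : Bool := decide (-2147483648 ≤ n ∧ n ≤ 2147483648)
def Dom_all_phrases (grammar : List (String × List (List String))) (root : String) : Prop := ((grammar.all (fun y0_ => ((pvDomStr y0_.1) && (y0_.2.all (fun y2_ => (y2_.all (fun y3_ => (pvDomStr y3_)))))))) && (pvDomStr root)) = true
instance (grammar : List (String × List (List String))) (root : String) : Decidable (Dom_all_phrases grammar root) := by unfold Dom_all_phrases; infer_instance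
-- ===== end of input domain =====

-- B memoizes each nonterminal's phrase set in a cache threaded through the recursion, so every
-- nonterminal is expanded at most once; equivalence is proved on grammars without a cycle
-- reachable from root (Pre_), exactly where Python A returns instead of hitting RecursionError.

-- ===== PORT A =====
-- {x + y for x in sub for y in rec} (insertion order: outer x, inner y)
def pvCombine (sub rec : List (List String)) : List (List String) :=
  PySem.Set.ofList (sub.flatMap (fun x => rec.map (fun y => x ++ y)))

-- inner loop of A: 'for rule in rules: rec = all_phrases(g, rule); sub = {x+y …}'
-- (recf = the recursive call at the current fuel; none propagates fuel exhaustion)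
def pvGoRuleA (recf : String → Option (List (List String))) :
    List String → List (List String) → Option (List (List String))
  | [], sub => some sub
  | r :: rs, sub =>
    match recf r with
    | none => none
    | some rec => pvGoRuleA recf rs (pvCombine sub rec)

-- outer loop of A: 'for rules in grammar[root]: …; phrases.update(sub_phrases)'
def pvGoRulesA (recf : String → Option (List (List String))) :
    List (List String) → List (List String) → Option (List (List String))
  | [], ph => some ph
  | rules :: rest, ph =>
    match pvGoRuleA recf rules [[]] with
    | none => none
    | some sub => pvGoRulesA recf rest (PySem.Set.update ph sub)

-- A's unbounded recursion, made total with fuel: 'none' = fuel exhausted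
-- (under Pre_ the chosen fuel is proved sufficient, so the 'none' branch is dead).
def pvAllA (g : List (String × List (List String))) : Nat → String → Option (List (List String))
  | 0, _ => none
  | f + 1, root =>
    match PySem.Dict.get? (PySem.Dict.mk g) root with
    | none => some [[root]]                    -- 'if root not in grammar: return {tuple([root])}'
    | some ruless => pvGoRulesA (pvAllA g f) ruless []

def pvAllSyms (g : List (String × List (List String))) : List String :=
  g.flatMap (fun kv => kv.1 :: kv.2.flatten)

-- fuel that is provably enough on every Pre_ input
def pvFuel (g : List (String × List (List String))) : Nat := (pvAllSyms g).length + 2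

def all_phrases (grammar : List (String × List (List String))) (root : String) : List (List String) :=
  (pvAllA grammar (pvFuel grammar) root).getD []

-- ===== PORT B =====
-- B threads the memo cache through the same traversal: solve(rule) returns (value, cache).
def pvGoRuleB (recf : String → PySem.Dict String (List (List String)) →
      Option (List (List String) × PySem.Dict String (List (List String)))) :
    List String → List (List String) → PySem.Dict String (List (List String)) →
      Option (List (List String) × PySem.Dict String (List (List String)))
  | [], sub, c => some (sub, c)
  | r :: rs, sub, c =>
    match recf r c with
    | none => none
    | some (rec, c') => pvGoRuleB recf rs (pvCombine sub rec) c'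

def pvGoRulesB (recf : String → PySem.Dict String (List (List String)) →
      Option (List (List String) × PySem.Dict String (List (List String)))) :
    List (List String) → List (List String) → PySem.Dict String (List (List String)) →
      Option (List (List String) × PySem.Dict String (List (List String)))
  | [], ph, c => some (ph, c)
  | rules :: rest, ph, c =>
    match pvGoRuleB recf rules [[]] c with
    | none => none
    | some (sub, c') => pvGoRulesB recf rest (PySem.Set.update ph sub) c'

-- B's 'solve', fueled the same way: each nonterminal is computed once and cached.
def pvSolveB (g : List (String × List (List String))) :
    Nat → String → PySem.Dict String (List (List String)) →
      Option (List (List String) × PySem.Dict String (List (List String)))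
  | 0, _, _ => none
  | f + 1, sym, c =>
    match PySem.Dict.get? (PySem.Dict.mk g) sym with
    | none => some ([[sym]], c)                -- 'if symbol not in grammar: return {(symbol,)}'
    | some ruless =>
      match PySem.Dict.get? c sym with
      | some v => some (v, c)                  -- 'if symbol in cache: return cache[symbol]'
      | none =>
        match pvGoRulesB (pvSolveB g f) ruless [] c with
        | none => none
        | some (res, c') => some (res, PySem.Dict.insert c' sym res)   -- 'cache[symbol] = result'

def all_phrases_alt (grammar : List (String × List (List String))) (root : String) : List (List String) :=
  match pvSolveB grammar (pvFuel grammar) root PySem.Dict.empty with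
  | some (v, _) => v
  | none => []

-- ===== PRECONDITION & SPEC =====
-- Pre_ excludes exactly the grammars with a key-cycle reachable from root, on which
-- Python A recurses forever (RecursionError); it is stated as graph reachability.
def pvSuccs (g : List (String × List (List String))) (s : String) : List String :=
  match PySem.Dict.get? (PySem.Dict.mk g) s with
  | none => []
  | some ruless => ruless.flatten

def pvStep (g : List (String × List (List String))) (S : Finset String) : Finset String :=
  S ∪ S.biUnion (fun s => (pvSuccs g s).toFinset)

def pvClosure (g : List (String × List (List String))) (S0 : Finset String) : Finset String :=
  (pvStep g)^[(S0 ∪ (pvAllSyms g).toFinset).card + 1] S0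

def Pre_all_phrases (grammar : List (String × List (List String))) (root : String) : Prop :=
  ∀ k ∈ pvClosure grammar {root}, k ∉ pvClosure grammar (pvSuccs grammar k).toFinset

instance (grammar : List (String × List (List String))) (root : String) :
    Decidable (Pre_all_phrases grammar root) := by unfold Pre_all_phrases; infer_instance

def pvWitness_all_phrases : (List (String × List (List String))) × String :=
  ([("S", [["a", "T"], ["T"]]), ("T", [["b"]])], "S")

def Spec_all_phrases (grammar : List (String × List (List String))) (root : String) (out : List (List String)) : Prop := out = all_phrases_alt grammar root
instance (grammar : List (String × List (List String))) (root : String) (out : List (List String)) : Decidable (Spec_all_phrases grammar root out) := by unfold Spec_all_phrases; infer_instance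

-- ===== CLAIM (what is proved, stated in full; the proofs are below) =====
def Claim_equal_all_phrases : Prop := ∀ (grammar : List (String × List (List String))) (root : String), Dom_all_phrases grammar root → Pre_all_phrases grammar root → Spec_all_phrases grammar root (all_phrases grammar root)

-- ===== LEMMAS AND PROOFS =====

-- ---- closure machinery ----
theorem pvStep_le (g : List (String × List (List String))) (S : Finset String) : S ⊆ pvStep g S :=
  Finset.subset_union_left

theorem pvSuccs_subset_allSyms (g : List (String × List (List String))) (s : String) :
    ∀ x ∈ pvSuccs g s, x ∈ pvAllSyms g := by
  intro x hx
  unfold pvSuccs at hx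
  rcases hg : PySem.Dict.get? (PySem.Dict.mk g) s with _ | rss
  · simp [hg] at hx
  · rw [hg] at hx
    have hmem : (s, rss) ∈ g := by
      clear hx
      induction g with
      | nil => simp [PySem.Dict.get?] at hg
      | cons kv rest ih =>
        obtain ⟨k1, k2⟩ := kv
        rw [PySem.Dict.get?_mk_cons] at hg
        by_cases h : k1 == s
        · simp only [h, if_pos] at hg
          have h1 : k1 = s := by simpa using h
          have h2 : k2 = rss := by simpa using hg
          subst h1; subst h2
          exact List.mem_cons_self
        · simp only [h, Bool.false_eq_true, reduceIte] at hg
          exact List.mem_cons_of_mem _ (ih hg)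
    unfold pvAllSyms
    simp only [List.mem_flatMap]
    exact ⟨(s, rss), hmem, by simp [hx]⟩

theorem pvIter_subset_univ (g : List (String × List (List String))) (S0 : Finset String) :
    ∀ n, (pvStep g)^[n] S0 ⊆ S0 ∪ (pvAllSyms g).toFinset := by
  intro n
  induction n with
  | zero => simp
  | succ n ih =>
    rw [Function.iterate_succ_apply']
    unfold pvStep
    apply Finset.union_subset ih
    intro x hx
    simp only [Finset.mem_biUnion, List.mem_toFinset] at hx
    obtain ⟨s, _, hxs⟩ := hx
    exact Finset.mem_union_right _ (List.mem_toFinset.mpr (pvSuccs_subset_allSyms g s x hxs))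

theorem pvIter_card_ge (f : Finset String → Finset String) (hf : ∀ S, S ⊆ f S) (S0 : Finset String) :
    ∀ i, (∀ j < i, f (f^[j] S0) ≠ f^[j] S0) → i ≤ (f^[i] S0).card := by
  intro i
  induction i with
  | zero => intro _; exact Nat.zero_le _
  | succ i ih =>
    intro h
    have h1 : i ≤ (f^[i] S0).card := ih (fun j hj => h j (Nat.lt_succ_of_lt hj))
    have hne : f (f^[i] S0) ≠ f^[i] S0 := h i (Nat.lt_succ_self i)
    have hss : f^[i] S0 ⊂ f (f^[i] S0) :=
      HasSubset.Subset.ssubset_of_ne (hf _) (Ne.symm hne)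
    have := Finset.card_lt_card hss
    rw [Function.iterate_succ_apply']
    omega

theorem pvClosure_fix (g : List (String × List (List String))) (S0 : Finset String) :
    pvStep g (pvClosure g S0) = pvClosure g S0 := by
  set N := (S0 ∪ (pvAllSyms g).toFinset).card + 1 with hN
  by_cases hex : ∃ j, j < N ∧ pvStep g ((pvStep g)^[j] S0) = (pvStep g)^[j] S0
  · obtain ⟨j, hj, hfix⟩ := hex
    have hstay : ∀ m, (pvStep g)^[m] ((pvStep g)^[j] S0) = (pvStep g)^[j] S0 :=
      fun m => Function.iterate_fixed hfix m
    have hNj : N = (N - j) + j := by omega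
    have hNeq : (pvStep g)^[N] S0 = (pvStep g)^[j] S0 := by
      rw [hNj, Function.iterate_add_apply]
      exact hstay (N - j)
    unfold pvClosure
    rw [← hN, hNeq, hfix]
  · exfalso
    have hge := pvIter_card_ge (pvStep g) (pvStep_le g) S0 N
      (fun j hj hfix => hex ⟨j, hj, hfix⟩)
    have hle : ((pvStep g)^[N] S0).card ≤ (S0 ∪ (pvAllSyms g).toFinset).card :=
      Finset.card_le_card (pvIter_subset_univ g S0 N)
    omega

theorem pvSubset_closure (g : List (String × List (List String))) (S0 : Finset String) :
    S0 ⊆ pvClosure g S0 := by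
  unfold pvClosure
  generalize (S0 ∪ (pvAllSyms g).toFinset).card + 1 = n
  induction n with
  | zero => simp
  | succ n ih =>
    rw [Function.iterate_succ_apply']
    exact ih.trans (pvStep_le g _)

theorem pvClosure_closed (g : List (String × List (List String))) (S0 : Finset String)
    (s : String) (hs : s ∈ pvClosure g S0) :
    ∀ x ∈ pvSuccs g s, x ∈ pvClosure g S0 := by
  intro x hx
  have := pvClosure_fix g S0
  rw [← this]
  unfold pvStep
  apply Finset.mem_union_right
  exact Finset.mem_biUnion.mpr ⟨s, hs, List.mem_toFinset.mpr hx⟩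

theorem pvClosure_min (g : List (String × List (List String))) (S0 T : Finset String)
    (hS : S0 ⊆ T) (hT : ∀ s ∈ T, ∀ x ∈ pvSuccs g s, x ∈ T) :
    pvClosure g S0 ⊆ T := by
  unfold pvClosure
  generalize (S0 ∪ (pvAllSyms g).toFinset).card + 1 = n
  induction n with
  | zero => simpa
  | succ n ih =>
    rw [Function.iterate_succ_apply']
    unfold pvStep
    apply Finset.union_subset ih
    intro x hx
    simp only [Finset.mem_biUnion, List.mem_toFinset] at hx
    obtain ⟨s, hsS, hxs⟩ := hx
    exact hT s (ih hsS) x hxs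

-- ---- the termination measure ----
def pvM (g : List (String × List (List String))) (sym : String) : Nat :=
  (pvClosure g {sym}).card

theorem pvClosure_singleton_subset (g : List (String × List (List String))) (S0 : Finset String)
    (s : String) (hs : s ∈ pvClosure g S0) : pvClosure g {s} ⊆ pvClosure g S0 :=
  pvClosure_min g {s} _ (Finset.singleton_subset_iff.mpr hs) (pvClosure_closed g S0)

theorem pvM_lt (g : List (String × List (List String))) (sym s : String)
    (hs : s ∈ pvSuccs g sym)
    (hacy : sym ∉ pvClosure g (pvSuccs g sym).toFinset) :
    pvM g s < pvM g sym := by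
  have hsym_self : sym ∈ pvClosure g {sym} :=
    pvSubset_closure g {sym} (Finset.mem_singleton_self sym)
  have hs_in : s ∈ pvClosure g {sym} := pvClosure_closed g {sym} sym hsym_self s hs
  have h1 : pvClosure g {s} ⊆ pvClosure g {sym} := pvClosure_singleton_subset g _ s hs_in
  have hs_in2 : s ∈ pvClosure g (pvSuccs g sym).toFinset :=
    pvSubset_closure g _ (List.mem_toFinset.mpr hs)
  have h2 : pvClosure g {s} ⊆ pvClosure g (pvSuccs g sym).toFinset :=
    pvClosure_singleton_subset g _ s hs_in2
  have hnot : sym ∉ pvClosure g {s} := fun h => hacy (h2 h)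
  exact Finset.card_lt_card ((Finset.ssubset_iff_of_subset h1).mpr ⟨sym, hsym_self, hnot⟩)

theorem pvM_lt_fuel (g : List (String × List (List String))) (root : String) :
    pvM g root < pvFuel g := by
  unfold pvM pvFuel
  have h1 : (pvClosure g {root}).card ≤ ({root} ∪ (pvAllSyms g).toFinset).card :=
    Finset.card_le_card (pvIter_subset_univ g {root} _)
  have h2 : ({root} ∪ (pvAllSyms g).toFinset).card ≤ 1 + (pvAllSyms g).toFinset.card :=
    le_trans (Finset.card_union_le _ _) (by simp)
  have h3 := List.toFinset_card_le (pvAllSyms g)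
  omega

-- ---- the common value of both programs ----
def pvPureRule (tv : String → List (List String)) :
    List String → List (List String) → List (List String)
  | [], sub => sub
  | r :: rs, sub => pvPureRule tv rs (pvCombine sub (tv r))

def pvPureRules (tv : String → List (List String)) :
    List (List String) → List (List String) → List (List String)
  | [], ph => ph
  | rules :: rest, ph => pvPureRules tv rest (PySem.Set.update ph (pvPureRule tv rules [[]]))

def pvTV (g : List (String × List (List String))) (k : String) : List (List String) :=
  (pvAllA g (pvM g k + 1) k).getD []

def pvSpecVal (g : List (String × List (List String))) (sym : String) : List (List String) :=
  match PySem.Dict.get? (PySem.Dict.mk g) sym with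
  | none => [[sym]]
  | some ruless => pvPureRules (pvTV g) ruless []

-- ---- fold lemmas ----
theorem pvGoRuleA_eq (recf : String → Option (List (List String)))
    (tv : String → List (List String)) (rs : List String)
    (h : ∀ r ∈ rs, recf r = some (tv r)) (sub : List (List String)) :
    pvGoRuleA recf rs sub = some (pvPureRule tv rs sub) := by
  induction rs generalizing sub with
  | nil => rfl
  | cons r rs ih =>
    unfold pvGoRuleA pvPureRule
    rw [h r (List.mem_cons_self)]
    exact ih (fun r hr => h r (List.mem_cons_of_mem _ hr)) _

theorem pvGoRulesA_eq (recf : String → Option (List (List String)))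
    (tv : String → List (List String)) (rss : List (List String))
    (h : ∀ rules ∈ rss, ∀ r ∈ rules, recf r = some (tv r)) (ph : List (List String)) :
    pvGoRulesA recf rss ph = some (pvPureRules tv rss ph) := by
  induction rss generalizing ph with
  | nil => rfl
  | cons rules rest ih =>
    unfold pvGoRulesA pvPureRules
    rw [pvGoRuleA_eq recf tv rules (h rules List.mem_cons_self) [[]]]
    exact ih (fun rules hr => h rules (List.mem_cons_of_mem _ hr)) _

-- main lemma for A: with enough fuel, A computes pvSpecVal
theorem pvAllA_eq (g : List (String × List (List String))) (root : String)
    (hpre : Pre_all_phrases g root) :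
    ∀ f sym, sym ∈ pvClosure g {root} → pvM g sym < f →
      pvAllA g f sym = some (pvSpecVal g sym) := by
  intro f
  induction f using Nat.strong_induction_on with
  | _ f IH =>
    intro sym hmem hf
    match f, hf with
    | f' + 1, hf =>
      unfold pvAllA pvSpecVal
      rcases hkey : PySem.Dict.get? (PySem.Dict.mk g) sym with _ | rss
      · rfl
      · have hsucc : ∀ r ∈ rss.flatten, r ∈ pvSuccs g sym := by
          intro r hr; unfold pvSuccs; rw [hkey]; exact hr
        have hrec : ∀ rules ∈ rss, ∀ r ∈ rules, pvAllA g f' r = some (pvTV g r) := by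
          intro rules hrules r hr
          have hrs : r ∈ pvSuccs g sym := hsucc r (List.mem_flatten.mpr ⟨rules, hrules, hr⟩)
          have hrC : r ∈ pvClosure g {root} := pvClosure_closed g {root} sym hmem r hrs
          have hmr : pvM g r < pvM g sym := pvM_lt g sym r hrs (hpre sym hmem)
          have h1 : pvAllA g f' r = some (pvSpecVal g r) :=
            IH f' (Nat.lt_succ_self f') r hrC (by omega)
          have h2 : pvAllA g (pvM g r + 1) r = some (pvSpecVal g r) :=
            IH (pvM g r + 1) (by omega) r hrC (Nat.lt_succ_self _)
          have htv : pvTV g r = pvSpecVal g r := by unfold pvTV; rw [h2]; rfl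
          rw [h1, htv]
        exact pvGoRulesA_eq (pvAllA g f') (pvTV g) rss hrec []

theorem pvTV_eq (g : List (String × List (List String))) (root : String)
    (hpre : Pre_all_phrases g root) (sym : String) (hmem : sym ∈ pvClosure g {root}) :
    pvTV g sym = pvSpecVal g sym := by
  unfold pvTV
  rw [pvAllA_eq g root hpre (pvM g sym + 1) sym hmem (Nat.lt_succ_self _)]
  rfl

-- ---- B side: cache invariant ----
def pvInv (g : List (String × List (List String))) (root : String)
    (c : PySem.Dict String (List (List String))) : Prop :=
  ∀ k v, PySem.Dict.get? c k = some v → k ∈ pvClosure g {root} ∧ v = pvTV g k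

theorem pvGoRuleB_eq
    (recf : String → PySem.Dict String (List (List String)) →
      Option (List (List String) × PySem.Dict String (List (List String))))
    (g : List (String × List (List String))) (root : String)
    (tv : String → List (List String)) (rs : List String)
    (h : ∀ r ∈ rs, ∀ c, pvInv g root c →
      ∃ c', recf r c = some (tv r, c') ∧ pvInv g root c')
    (sub : List (List String)) (c : PySem.Dict String (List (List String)))
    (hc : pvInv g root c) :
    ∃ c', pvGoRuleB recf rs sub c = some (pvPureRule tv rs sub, c') ∧ pvInv g root c' := by
  induction rs generalizing sub c with
  | nil => exact ⟨c, rfl, hc⟩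
  | cons r rs ih =>
    obtain ⟨c', hr, hc'⟩ := h r List.mem_cons_self c hc
    unfold pvGoRuleB pvPureRule
    rw [hr]
    exact ih (fun r hr => h r (List.mem_cons_of_mem _ hr)) _ c' hc'

theorem pvGoRulesB_eq
    (recf : String → PySem.Dict String (List (List String)) →
      Option (List (List String) × PySem.Dict String (List (List String))))
    (g : List (String × List (List String))) (root : String)
    (tv : String → List (List String)) (rss : List (List String))
    (h : ∀ rules ∈ rss, ∀ r ∈ rules, ∀ c, pvInv g root c →
      ∃ c', recf r c = some (tv r, c') ∧ pvInv g root c')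
    (ph : List (List String)) (c : PySem.Dict String (List (List String)))
    (hc : pvInv g root c) :
    ∃ c', pvGoRulesB recf rss ph c = some (pvPureRules tv rss ph, c') ∧ pvInv g root c' := by
  induction rss generalizing ph c with
  | nil => exact ⟨c, rfl, hc⟩
  | cons rules rest ih =>
    obtain ⟨c', hr, hc'⟩ :=
      pvGoRuleB_eq recf g root tv rules (h rules List.mem_cons_self) [[]] c hc
    unfold pvGoRulesB pvPureRules
    rw [hr]
    exact ih (fun rules hr => h rules (List.mem_cons_of_mem _ hr)) _ c' hc'

-- main lemma for B: with enough fuel and a sound cache, B computes the same value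
theorem pvSolveB_eq (g : List (String × List (List String))) (root : String)
    (hpre : Pre_all_phrases g root) :
    ∀ f sym c, sym ∈ pvClosure g {root} → pvM g sym < f → pvInv g root c →
      ∃ c', pvSolveB g f sym c = some (pvTV g sym, c') ∧ pvInv g root c' := by
  intro f
  induction f with
  | zero => intro sym c _ hf; omega
  | succ f' IH =>
    intro sym c hmem hf hc
    unfold pvSolveB
    rcases hkey : PySem.Dict.get? (PySem.Dict.mk g) sym with _ | rss
    · refine ⟨c, ?_, hc⟩
      have htv : pvTV g sym = [[sym]] := by
        rw [pvTV_eq g root hpre sym hmem]; unfold pvSpecVal; rw [hkey]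
      show some ([[sym]], c) = some (pvTV g sym, c)
      rw [htv]
    · rcases hcache : PySem.Dict.get? c sym with _ | v
      · have hrec : ∀ rules ∈ rss, ∀ r ∈ rules, ∀ c, pvInv g root c →
            ∃ c', pvSolveB g f' r c = some (pvTV g r, c') ∧ pvInv g root c' := by
          intro rules hrules r hr c0 hc0
          have hrs : r ∈ pvSuccs g sym := by
            unfold pvSuccs; rw [hkey]; exact List.mem_flatten.mpr ⟨rules, hrules, hr⟩
          have hrC : r ∈ pvClosure g {root} := pvClosure_closed g {root} sym hmem r hrs
          have hmr : pvM g r < pvM g sym := pvM_lt g sym r hrs (hpre sym hmem)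
          exact IH r c0 hrC (by omega) hc0
        obtain ⟨c', hrun, hc'⟩ := pvGoRulesB_eq (pvSolveB g f') g root (pvTV g) rss hrec [] c hc
        have hres : pvPureRules (pvTV g) rss [] = pvTV g sym := by
          rw [pvTV_eq g root hpre sym hmem]; unfold pvSpecVal; rw [hkey]
        refine ⟨PySem.Dict.insert c' sym (pvPureRules (pvTV g) rss []), ?_, ?_⟩
        · show (match pvGoRulesB (pvSolveB g f') rss [] c with
              | none => none
              | some (res, c') => some (res, PySem.Dict.insert c' sym res)) =
            some (pvTV g sym, PySem.Dict.insert c' sym (pvPureRules (pvTV g) rss []))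
          rw [hrun, hres]
        intro k v hkv
        rw [PySem.Dict.get?_insert] at hkv
        by_cases hks : k = sym
        · simp [hks] at hkv
          exact ⟨hks ▸ hmem, by rw [← hkv, hks, hres]⟩
        · simp [hks] at hkv
          exact hc' k v hkv
      · obtain ⟨hkC, hv⟩ := hc sym v hcache
        refine ⟨c, ?_, hc⟩
        show some (v, c) = some (pvTV g sym, c)
        rw [hv]

-- ===== VERDICT (by name: the statement is the Claim_ definition above) =====
theorem all_phrases_spec : Claim_equal_all_phrases := by
  intro g root _ hpre
  unfold Spec_all_phrases all_phrases all_phrases_alt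
  have hmem : root ∈ pvClosure g {root} :=
    pvSubset_closure g {root} (Finset.mem_singleton_self root)
  have hfuel : pvM g root < pvFuel g := pvM_lt_fuel g root
  have hA := pvAllA_eq g root hpre (pvFuel g) root hmem hfuel
  have hinv : pvInv g root PySem.Dict.empty := by
    intro k v hkv; rw [PySem.Dict.get?_empty] at hkv; exact absurd hkv (by simp)
  obtain ⟨c', hB, _⟩ := pvSolveB_eq g root hpre (pvFuel g) root PySem.Dict.empty hmem hfuel hinv
  rw [hA, hB]
  rw [pvTV_eq g root hpre root hmem]
  rfl
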